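-- pv_equiv track=rewrite | github.com/la96bikal/XRay-Image-Classification | DataPreprocessing/DataExtractorMultiLabel.py | data_info
-- ===== SOURCE A (Python) =====
-- def data_info(data, targets):
--     labels = [pair[1] for pair in data]
--     labels_ind = [[label[0] for label in labels],
--                  [label[1] for label in labels],
--                  [label[2] for label in labels],
--                  [label[3] for label in labels],
--                  [label[4] for label in labels]]
--     nums = [sum(label) for label in labels_ind]
--     temp = [sum(label) for label in labels]
--     neg_num = len([y for y in temp if y == 0])
--
--     label_num = {}
--     for num, label in zip(nums, targets):
--         label_num[label] = num
--     label_num["no_finding"] = neg_num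
--     return label_num
-- ===== SOURCE B (Python) =====
-- def data_info(data, targets):
--     sums = [0, 0, 0, 0, 0]
--     neg_num = 0
--     for pair in data:
--         label = pair[1]
--         for i in range(5):
--             sums[i] += label[i]
--         if sum(label) == 0:
--             neg_num += 1
--     label_num = {}
--     for s, t in zip(sums, targets):
--         label_num[t] = s
--     label_num["no_finding"] = neg_num
--     return label_num
-- ===== Notes on version B (the rewrite author's own statement) =====
-- stated objective: alternative
-- what changed: Single pass over the data accumulating the five column sums and the all-zero-row count together, instead of materialising five transposed column lists plus a separate row-sum list and counting pass (fewer passes and no intermediate lists; speed not measured).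
import Mathlib
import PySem

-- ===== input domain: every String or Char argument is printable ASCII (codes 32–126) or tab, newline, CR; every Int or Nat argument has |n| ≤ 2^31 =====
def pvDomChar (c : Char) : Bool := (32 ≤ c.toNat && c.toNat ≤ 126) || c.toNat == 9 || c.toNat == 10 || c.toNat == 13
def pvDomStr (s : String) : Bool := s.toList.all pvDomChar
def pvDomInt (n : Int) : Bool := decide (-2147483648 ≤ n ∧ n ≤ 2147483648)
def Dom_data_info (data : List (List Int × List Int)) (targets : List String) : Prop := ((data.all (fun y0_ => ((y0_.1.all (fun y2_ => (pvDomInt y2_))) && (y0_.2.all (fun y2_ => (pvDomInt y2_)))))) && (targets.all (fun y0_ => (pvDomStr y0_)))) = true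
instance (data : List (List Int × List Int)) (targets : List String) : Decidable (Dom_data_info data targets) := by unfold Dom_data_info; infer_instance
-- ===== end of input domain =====

-- B replaces A's five transposed column lists, separate row-sum list and counting pass
-- by one fold over the data carrying (five column sums, all-zero-row count), avoiding the intermediate lists.

-- ===== PORT A =====
-- label[i] is ported as pyGetD label i 0; Pre_data_info guarantees i < label.length, where this is exact.
def data_info (data : List (List Int × List Int)) (targets : List String) : List (String × Int) :=
  let labels := data.map (fun pair => pair.2)
  let labels_ind := [labels.map (fun label => PySem.List.pyGetD label 0 0),
                     labels.map (fun label => PySem.List.pyGetD label 1 0),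
                     labels.map (fun label => PySem.List.pyGetD label 2 0),
                     labels.map (fun label => PySem.List.pyGetD label 3 0),
                     labels.map (fun label => PySem.List.pyGetD label 4 0)]
  let nums := labels_ind.map (fun label => label.sum)
  let temp := labels.map (fun label => label.sum)
  let neg_num : Int := ((temp.filter (fun y => y == 0)).length : Int)
  let label_num : PySem.Dict String Int :=
    (nums.zip targets).foldl (fun d p => d.insert p.2 p.1) PySem.Dict.empty
  let label_num := label_num.insert "no_finding" neg_num
  label_num.items

-- ===== PORT B =====
-- the single-pass loop: state = (s0, s1, s2, s3, s4, neg_num); label[i] ported as pyGetD (exact under Pre_)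
def data_info_alt (data : List (List Int × List Int)) (targets : List String) : List (String × Int) :=
  let st := data.foldl
    (fun (st : Int × Int × Int × Int × Int × Int) pair =>
      let label := pair.2
      let st := (st.1 + PySem.List.pyGetD label 0 0, st.2.1 + PySem.List.pyGetD label 1 0,
                 st.2.2.1 + PySem.List.pyGetD label 2 0, st.2.2.2.1 + PySem.List.pyGetD label 3 0,
                 st.2.2.2.2.1 + PySem.List.pyGetD label 4 0, st.2.2.2.2.2)
      if label.sum == 0 then (st.1, st.2.1, st.2.2.1, st.2.2.2.1, st.2.2.2.2.1, st.2.2.2.2.2 + 1) else st)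
    (0, 0, 0, 0, 0, 0)
  let sums := [st.1, st.2.1, st.2.2.1, st.2.2.2.1, st.2.2.2.2.1]
  let label_num : PySem.Dict String Int :=
    (sums.zip targets).foldl (fun d p => d.insert p.2 p.1) PySem.Dict.empty
  let label_num := label_num.insert "no_finding" st.2.2.2.2.2
  label_num.items

-- ===== PRECONDITION & SPEC =====
-- Pre_ excludes exactly the inputs where Python A raises IndexError: a pair whose label list
-- has fewer than 5 entries (B's Python raises there too).
def Pre_data_info (data : List (List Int × List Int)) (targets : List String) : Prop :=
  ∀ p ∈ data, 5 ≤ p.2.length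
instance (data : List (List Int × List Int)) (targets : List String) : Decidable (Pre_data_info data targets) := by unfold Pre_data_info; infer_instance
def pvWitness_data_info : (List (List Int × List Int)) × List String :=
  ([([1], [1, 0, 0, 1, 0]), ([], [0, 0, 0, 0, 0])], ["a", "b", "c", "d", "e"])

def Spec_data_info (data : List (List Int × List Int)) (targets : List String) (out : List (String × Int)) : Prop := out = data_info_alt data targets
instance (data : List (List Int × List Int)) (targets : List String) (out : List (String × Int)) : Decidable (Spec_data_info data targets out) := by unfold Spec_data_info; infer_instance

-- ===== CLAIM (what is proved, stated in full; the proofs are below) =====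
def Claim_equal_data_info : Prop := ∀ (data : List (List Int × List Int)) (targets : List String), Dom_data_info data targets → Pre_data_info data targets → Spec_data_info data targets (data_info data targets)

-- ===== LEMMAS AND PROOFS =====

-- B's fold computes the five column sums and the all-zero-row count.
theorem data_info_fold_char (data : List (List Int × List Int))
    (a b c d e n : Int) :
    data.foldl
      (fun (st : Int × Int × Int × Int × Int × Int) pair =>
        let label := pair.2
        let st := (st.1 + PySem.List.pyGetD label 0 0, st.2.1 + PySem.List.pyGetD label 1 0,
                   st.2.2.1 + PySem.List.pyGetD label 2 0, st.2.2.2.1 + PySem.List.pyGetD label 3 0,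
                   st.2.2.2.2.1 + PySem.List.pyGetD label 4 0, st.2.2.2.2.2)
        if label.sum == 0 then (st.1, st.2.1, st.2.2.1, st.2.2.2.1, st.2.2.2.2.1, st.2.2.2.2.2 + 1) else st)
      (a, b, c, d, e, n)
    = (a + (data.map (fun p => PySem.List.pyGetD p.2 0 0)).sum,
       b + (data.map (fun p => PySem.List.pyGetD p.2 1 0)).sum,
       c + (data.map (fun p => PySem.List.pyGetD p.2 2 0)).sum,
       d + (data.map (fun p => PySem.List.pyGetD p.2 3 0)).sum,
       e + (data.map (fun p => PySem.List.pyGetD p.2 4 0)).sum,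
       n + (data.countP (fun p => p.2.sum == 0) : Int)) := by
  induction data generalizing a b c d e n with
  | nil => simp
  | cons hd tl ih =>
    simp only [List.foldl_cons, List.map_cons, List.sum_cons, List.countP_cons]
    by_cases h : hd.2.sum = 0
    · simp only [h, beq_self_eq_true, if_true]
      rw [ih]
      simp [Prod.ext_iff]
      refine ⟨by ring, by ring, by ring, by ring, by ring, by ring⟩
    · simp only [show (hd.2.sum == 0) = false from by simp [h]]
      rw [ih]
      simp [Prod.ext_iff]
      refine ⟨by ring, by ring, by ring, by ring, by ring⟩

theorem data_info_spec_aux (data : List (List Int × List Int)) (targets : List String) :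
    data_info data targets = data_info_alt data targets := by
  unfold data_info data_info_alt
  rw [data_info_fold_char]
  simp only [List.map_map, Function.comp_def]
  congr 2
  · simp
  · -- neg_num: the filter-length count equals the row-wise countP
    rw [List.countP_eq_length_filter, List.filter_map, List.length_map]
    simp [Function.comp_def]

-- ===== VERDICT (by name: the statement is the Claim_ definition above) =====
theorem data_info_spec : Claim_equal_data_info := by
  intro data targets _ _
  unfold Spec_data_info
  exact data_info_spec_aux data targets
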